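-- pv_equiv track=rewrite | github.com/math919191/AdventOfCode22 | day17.py | checkIfHitBottom
-- ===== SOURCE A (Python) =====
-- def checkIfHitBottom(chamber, rockCoor, rockNum):
--     x = rockCoor[0]
--     y = rockCoor[1] + 1
--     if rockNum == 0:
--         for i in range(4):
--             if chamber[x + i] == y - 1:
--                 return True
--     elif rockNum == 1:
--         if chamber[x+1] == y - 1 - 1:
--             return True
--         if chamber[x] == y - 1:
--             return True
--         if chamber[x+2] == y - 1:
--             return True
--     elif rockNum == 2:
--         for i in range(3):
--             if chamber[x + i] == y - 1:
--                 return True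
--     elif rockNum == 3:
--         if chamber[x] == y - 1:
--             return True
--     elif rockNum == 4:
--         for i in range(2):
--             if chamber[x + i] == y - 1:
--                 return True
--
--     return False
-- ===== SOURCE B (Python) =====
-- def checkIfHitBottom(chamber, rockCoor, rockNum):
--     widths = {0: 4, 1: 3, 2: 3, 3: 1, 4: 2}
--     if rockNum not in widths:
--         return False
--     x = rockCoor[0]
--     y0 = rockCoor[1]
--     w = widths[rockNum]
--     for k, v in chamber.items():
--         if x <= k < x + w:
--             if v == (y0 - 1 if rockNum == 1 and k == x + 1 else y0):
--                 return True
--     return False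
-- ===== Notes on version B (the rewrite author's own statement) =====
-- stated objective: alternative
-- what changed: A probes the chamber dict at each column under the rock (raising KeyError on a missing column); B inverts the traversal: one pass over chamber.items(), testing whether each stored (column, height) entry lies in the rock's footprint with the required target height, so B indexes nothing and never raises.
import Mathlib
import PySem

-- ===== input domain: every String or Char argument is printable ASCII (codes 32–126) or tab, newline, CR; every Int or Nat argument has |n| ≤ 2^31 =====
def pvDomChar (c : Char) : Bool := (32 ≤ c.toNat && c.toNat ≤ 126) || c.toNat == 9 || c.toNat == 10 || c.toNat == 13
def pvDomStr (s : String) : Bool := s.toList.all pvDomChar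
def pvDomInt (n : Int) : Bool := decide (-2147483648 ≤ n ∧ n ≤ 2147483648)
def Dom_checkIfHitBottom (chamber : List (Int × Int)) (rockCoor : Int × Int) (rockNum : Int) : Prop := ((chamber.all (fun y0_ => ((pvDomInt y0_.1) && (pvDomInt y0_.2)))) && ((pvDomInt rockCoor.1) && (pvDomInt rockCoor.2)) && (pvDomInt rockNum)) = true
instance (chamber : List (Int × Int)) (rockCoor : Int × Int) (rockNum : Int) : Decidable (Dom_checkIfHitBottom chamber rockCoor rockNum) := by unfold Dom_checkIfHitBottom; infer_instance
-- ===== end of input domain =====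

-- B inverts A's traversal: instead of probing the chamber dict at each column under the rock
-- (which can raise KeyError), B makes one pass over the dict's entries and tests whether each
-- stored (column, height) entry lies in the rock's footprint with the required target height.

-- ===== PORT A =====
-- chamber[k] == v : dict lookup; KeyError (none) is excluded by Pre_, so inside Pre_ this equals the Python comparison
def pvLookupEq (chamber : List (Int × Int)) (k v : Int) : Bool :=
  (PySem.Dict.mk chamber).get? k == some v

def checkIfHitBottom (chamber : List (Int × Int)) (rockCoor : Int × Int) (rockNum : Int) : Bool :=
  let x := rockCoor.1
  let y := rockCoor.2 + 1
  if rockNum == 0 then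
    (PySem.List.pyRange 0 4 1).any (fun i => pvLookupEq chamber (x + i) (y - 1))
  else if rockNum == 1 then
    pvLookupEq chamber (x + 1) (y - 1 - 1) || pvLookupEq chamber x (y - 1) ||
      pvLookupEq chamber (x + 2) (y - 1)
  else if rockNum == 2 then
    (PySem.List.pyRange 0 3 1).any (fun i => pvLookupEq chamber (x + i) (y - 1))
  else if rockNum == 3 then
    pvLookupEq chamber x (y - 1)
  else if rockNum == 4 then
    (PySem.List.pyRange 0 2 1).any (fun i => pvLookupEq chamber (x + i) (y - 1))
  else
    false

-- ===== PORT B =====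
def pvWidths : PySem.Dict Int Int :=
  PySem.Dict.ofList [(0, 4), (1, 3), (2, 3), (3, 1), (4, 2)]

-- chamber.items() iterated directly: inside Pre_ the association list has distinct keys,
-- so it IS the Python dict's item sequence.
def checkIfHitBottom_alt (chamber : List (Int × Int)) (rockCoor : Int × Int) (rockNum : Int) : Bool :=
  match pvWidths.get? rockNum with
  | none => false
  | some w =>
    let x := rockCoor.1
    let y0 := rockCoor.2
    chamber.any (fun p =>
      (decide (x ≤ p.1) && decide (p.1 < x + w)) &&
      (p.2 == (if rockNum == 1 && p.1 == x + 1 then y0 - 1 else y0)))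

-- ===== PRECONDITION & SPEC =====
-- Pre_ excludes (a) the inputs on which Python A raises KeyError: each column A probes, in A's
-- order and stopping at the first hit (early return), must be present in chamber; and (b)
-- association lists with duplicate keys, which no Python dict can produce (the encoding's
-- first-match lookup is an artefact on them, both Pythons see the same deduplicated dict).
def pvHasKey (chamber : List (Int × Int)) (k : Int) : Bool :=
  ((PySem.Dict.mk chamber).get? k).isSome

-- pvNeed: every listed key must be present in chamber, scanning in A's order and stopping
-- at the first (key, value) hit (A returns True there, so later keys are never looked up)
def pvNeed (chamber : List (Int × Int)) : List (Int × Int) → Bool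
  | [] => true
  | (k, v) :: rest => pvHasKey chamber k && (pvLookupEq chamber k v || pvNeed chamber rest)

def Pre_checkIfHitBottom (chamber : List (Int × Int)) (rockCoor : Int × Int) (rockNum : Int) : Prop :=
  (chamber.map Prod.fst).Nodup ∧
  (rockNum = 0 → pvNeed chamber [(rockCoor.1, rockCoor.2), (rockCoor.1 + 1, rockCoor.2),
      (rockCoor.1 + 2, rockCoor.2), (rockCoor.1 + 3, rockCoor.2)] = true) ∧
  (rockNum = 1 → pvNeed chamber [(rockCoor.1 + 1, rockCoor.2 - 1), (rockCoor.1, rockCoor.2),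
      (rockCoor.1 + 2, rockCoor.2)] = true) ∧
  (rockNum = 2 → pvNeed chamber [(rockCoor.1, rockCoor.2), (rockCoor.1 + 1, rockCoor.2),
      (rockCoor.1 + 2, rockCoor.2)] = true) ∧
  (rockNum = 3 → pvNeed chamber [(rockCoor.1, rockCoor.2)] = true) ∧
  (rockNum = 4 → pvNeed chamber [(rockCoor.1, rockCoor.2), (rockCoor.1 + 1, rockCoor.2)] = true)

instance (chamber : List (Int × Int)) (rockCoor : Int × Int) (rockNum : Int) : Decidable (Pre_checkIfHitBottom chamber rockCoor rockNum) := by unfold Pre_checkIfHitBottom; infer_instance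

def pvWitness_checkIfHitBottom : (List (Int × Int)) × (Int × Int) × Int := ([(0, 0)], (0, 0), 3)

def Spec_checkIfHitBottom (chamber : List (Int × Int)) (rockCoor : Int × Int) (rockNum : Int) (out : Bool) : Prop := out = checkIfHitBottom_alt chamber rockCoor rockNum
instance (chamber : List (Int × Int)) (rockCoor : Int × Int) (rockNum : Int) (out : Bool) : Decidable (Spec_checkIfHitBottom chamber rockCoor rockNum out) := by unfold Spec_checkIfHitBottom; infer_instance

-- ===== CLAIM (what is proved, stated in full; the proofs are below) =====
def Claim_equal_checkIfHitBottom : Prop := ∀ (chamber : List (Int × Int)) (rockCoor : Int × Int) (rockNum : Int), Dom_checkIfHitBottom chamber rockCoor rockNum → Pre_checkIfHitBottom chamber rockCoor rockNum → Spec_checkIfHitBottom chamber rockCoor rockNum (checkIfHitBottom chamber rockCoor rockNum)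

-- ===== LEMMAS AND PROOFS =====
theorem pvWitness_ok :
    Dom_checkIfHitBottom pvWitness_checkIfHitBottom.1 pvWitness_checkIfHitBottom.2.1 pvWitness_checkIfHitBottom.2.2 ∧
    Pre_checkIfHitBottom pvWitness_checkIfHitBottom.1 pvWitness_checkIfHitBottom.2.1 pvWitness_checkIfHitBottom.2.2 := by
  decide


-- with distinct keys, a successful first-match lookup is exactly membership of the pair
theorem key_mem (chamber : List (Int × Int)) (h : (chamber.map Prod.fst).Nodup) (k v : Int) :
    pvLookupEq chamber k v = true ↔ (k, v) ∈ chamber := by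
  unfold pvLookupEq
  rw [beq_iff_eq, PySem.Dict.get?_eq_some_iff_mem_items]
  exact h

-- a chamber scan with an entrywise predicate equals probing each pair of L
theorem any_scan (chamber : List (Int × Int)) (h : (chamber.map Prod.fst).Nodup)
    (L : List (Int × Int)) (pred : Int × Int → Bool)
    (hpred : ∀ p, pred p = true ↔ p ∈ L) :
    chamber.any pred = L.any (fun q => pvLookupEq chamber q.1 q.2) := by
  rw [Bool.eq_iff_iff]
  simp only [List.any_eq_true, hpred, key_mem chamber h]
  constructor
  · rintro ⟨p, hc, hL⟩; exact ⟨p, hL, hc⟩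
  · rintro ⟨p, hL, hc⟩; exact ⟨p, hc, hL⟩

-- ===== VERDICT (by name: the statement is the Claim_ definition above) =====
theorem checkIfHitBottom_spec : Claim_equal_checkIfHitBottom := by
  intro chamber rockCoor rockNum _ pre
  obtain ⟨hnd, -⟩ := pre
  unfold Spec_checkIfHitBottom checkIfHitBottom checkIfHitBottom_alt
  by_cases h0 : rockNum = 0
  · subst h0
    rw [show pvWidths.get? 0 = some 4 from by decide]
    simp only [Int.reduceBEq, reduceIte, Bool.false_and]
    refine Eq.trans ?_ (any_scan chamber hnd [(rockCoor.1, rockCoor.2), (rockCoor.1 + 1, rockCoor.2),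
        (rockCoor.1 + 2, rockCoor.2), (rockCoor.1 + 3, rockCoor.2)] _ ?_).symm
    · rw [show PySem.List.pyRange 0 4 1 = [0, 1, 2, 3] from by decide]
      simp [show rockCoor.2 + 1 - 1 = rockCoor.2 from by ring]
    · rintro ⟨k, v⟩; simp [Prod.ext_iff]; omega
  by_cases h1 : rockNum = 1
  · subst h1
    rw [show pvWidths.get? 1 = some 3 from by decide]
    simp only [Int.reduceBEq, reduceIte, Bool.true_and]
    refine Eq.trans ?_ (any_scan chamber hnd [(rockCoor.1 + 1, rockCoor.2 - 1),
        (rockCoor.1, rockCoor.2), (rockCoor.1 + 2, rockCoor.2)] _ ?_).symm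
    · simp [show rockCoor.2 + 1 - 1 = rockCoor.2 from by ring, Bool.or_assoc]
    · rintro ⟨k, v⟩
      by_cases hk : k = rockCoor.1 + 1 <;> simp [hk, Prod.ext_iff] <;> omega
  by_cases h2 : rockNum = 2
  · subst h2
    rw [show pvWidths.get? 2 = some 3 from by decide]
    simp only [Int.reduceBEq, reduceIte, Bool.false_and]
    refine Eq.trans ?_ (any_scan chamber hnd [(rockCoor.1, rockCoor.2), (rockCoor.1 + 1, rockCoor.2),
        (rockCoor.1 + 2, rockCoor.2)] _ ?_).symm
    · rw [show PySem.List.pyRange 0 3 1 = [0, 1, 2] from by decide]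
      simp [show rockCoor.2 + 1 - 1 = rockCoor.2 from by ring]
    · rintro ⟨k, v⟩; simp [Prod.ext_iff]; omega
  by_cases h3 : rockNum = 3
  · subst h3
    rw [show pvWidths.get? 3 = some 1 from by decide]
    simp only [Int.reduceBEq, reduceIte, Bool.false_and]
    refine Eq.trans ?_ (any_scan chamber hnd [(rockCoor.1, rockCoor.2)] _ ?_).symm
    · simp [show rockCoor.2 + 1 - 1 = rockCoor.2 from by ring]
    · rintro ⟨k, v⟩; simp [Prod.ext_iff]; omega
  by_cases h4 : rockNum = 4
  · subst h4
    rw [show pvWidths.get? 4 = some 2 from by decide]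
    simp only [Int.reduceBEq, reduceIte, Bool.false_and]
    refine Eq.trans ?_ (any_scan chamber hnd [(rockCoor.1, rockCoor.2),
        (rockCoor.1 + 1, rockCoor.2)] _ ?_).symm
    · rw [show PySem.List.pyRange 0 2 1 = [0, 1] from by decide]
      simp [show rockCoor.2 + 1 - 1 = rockCoor.2 from by ring]
    · rintro ⟨k, v⟩; simp [Prod.ext_iff]; omega
  · have e0 : ((0 : Int) == rockNum) = false := by simpa using Ne.symm h0
    have e1 : ((1 : Int) == rockNum) = false := by simpa using Ne.symm h1
    have e2 : ((2 : Int) == rockNum) = false := by simpa using Ne.symm h2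
    have e3 : ((3 : Int) == rockNum) = false := by simpa using Ne.symm h3
    have e4 : ((4 : Int) == rockNum) = false := by simpa using Ne.symm h4
    have hw : pvWidths.get? rockNum = none := by
      rw [show pvWidths = PySem.Dict.mk [(0, 4), (1, 3), (2, 3), (3, 1), (4, 2)] from by decide]
      simp [e0, e1, e2, e3, e4, PySem.Dict.get?]
    rw [hw]
    simp [h0, h1, h2, h3, h4]
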